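-- pv_equiv track=rewrite | github.com/mesakh123/CarlaSimulatorKitti | test.py | calc_projected_2d_bbox
-- ===== SOURCE A (Python) =====
-- def calc_projected_2d_bbox(vertices_pos2d):
--     """Takes in all vertices in pixel projection and calculates min and max of all x and y coordinates.
--     Returns left top, right bottom pixel coordinates for the 2d bounding box as a list of four values.
--     Note that vertices_pos2d contains a list of (y_pos2d, x_pos2d) tuples, or None
--     """
--
--     legal_pos2d = list(filter(lambda x: x is not None, vertices_pos2d))
--     y_coords, x_coords = [int(x[0][0]) for x in legal_pos2d], [
--         int(x[1][0]) for x in legal_pos2d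
--     ]
--     min_x, max_x = min(x_coords), max(x_coords)
--     min_y, max_y = min(y_coords), max(y_coords)
--     return [min_x, min_y, max_x, max_y]
-- ===== SOURCE B (Python) =====
-- def calc_projected_2d_bbox(vertices_pos2d):
--     """One pass over the legal vertices maintaining four running extrema."""
--     it = (v for v in vertices_pos2d if v is not None)
--     first = next(it, None)
--     if first is None:
--         raise ValueError("calc_projected_2d_bbox: no legal vertices")
--     min_y = max_y = int(first[0][0])
--     min_x = max_x = int(first[1][0])
--     for v in it:
--         y, x = int(v[0][0]), int(v[1][0])
--         min_x = min(min_x, x)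
--         min_y = min(min_y, y)
--         max_x = max(max_x, x)
--         max_y = max(max_y, y)
--     return [min_x, min_y, max_x, max_y]
-- ===== Notes on version B (the rewrite author's own statement) =====
-- stated objective: alternative
-- what changed: Replaces the two comprehension lists plus four min/max library calls with a single pass over the legal vertices that maintains four running extrema seeded from the first legal vertex.
import Mathlib
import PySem

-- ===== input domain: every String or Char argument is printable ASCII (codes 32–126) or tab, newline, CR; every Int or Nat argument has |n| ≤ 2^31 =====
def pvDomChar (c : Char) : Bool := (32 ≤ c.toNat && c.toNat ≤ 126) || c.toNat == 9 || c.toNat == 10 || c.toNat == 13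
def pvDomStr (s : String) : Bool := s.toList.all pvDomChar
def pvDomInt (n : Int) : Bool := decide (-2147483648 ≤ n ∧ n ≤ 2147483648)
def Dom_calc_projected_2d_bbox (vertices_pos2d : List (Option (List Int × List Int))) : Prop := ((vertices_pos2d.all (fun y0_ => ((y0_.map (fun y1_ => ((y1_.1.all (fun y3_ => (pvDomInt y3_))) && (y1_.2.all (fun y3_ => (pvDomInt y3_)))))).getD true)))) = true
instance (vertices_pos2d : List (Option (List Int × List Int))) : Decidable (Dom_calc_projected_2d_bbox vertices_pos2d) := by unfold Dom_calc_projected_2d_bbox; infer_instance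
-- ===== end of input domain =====

-- B replaces the two comprehension lists plus four min/max calls with one pass
-- keeping four running extrema seeded from the first legal vertex (alternative
-- decomposition, same cost). Equivalence of return values is proved on Pre_.


-- ===== PORT A =====
-- filter(None) → filterMap id; x[0][0] → pyGet? (getD 0 never reached on Pre_);
-- min/max → PySem.List.min?/max? (getD 0 never reached on Pre_).
def calc_projected_2d_bbox (vertices_pos2d : List (Option (List Int × List Int))) : List Int :=
  let legal_pos2d := vertices_pos2d.filterMap id
  let y_coords := legal_pos2d.map (fun x => (PySem.List.pyGet? x.1 0).getD 0)
  let x_coords := legal_pos2d.map (fun x => (PySem.List.pyGet? x.2 0).getD 0)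
  let min_x := (PySem.List.min? x_coords (fun y => y)).getD 0
  let max_x := (PySem.List.max? x_coords (fun y => y)).getD 0
  let min_y := (PySem.List.min? y_coords (fun y => y)).getD 0
  let max_y := (PySem.List.max? y_coords (fun y => y)).getD 0
  [min_x, min_y, max_x, max_y]

-- ===== PORT B =====
-- the for-loop over the remaining vertices, four accumulators
def bboxLoop : List (Option (List Int × List Int)) → Int → Int → Int → Int → List Int
  | [], min_x, min_y, max_x, max_y => [min_x, min_y, max_x, max_y]
  | none :: rest, min_x, min_y, max_x, max_y => bboxLoop rest min_x min_y max_x max_y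
  | some v :: rest, min_x, min_y, max_x, max_y =>
      let y := (PySem.List.pyGet? v.1 0).getD 0
      let x := (PySem.List.pyGet? v.2 0).getD 0
      bboxLoop rest (min min_x x) (min min_y y) (max max_x x) (max max_y y)

-- scan for the first legal vertex, seed the accumulators from it ([] = the ValueError case)
def calc_projected_2d_bbox_alt : List (Option (List Int × List Int)) → List Int
  | [] => []
  | none :: rest => calc_projected_2d_bbox_alt rest
  | some v :: rest =>
      let y := (PySem.List.pyGet? v.1 0).getD 0
      let x := (PySem.List.pyGet? v.2 0).getD 0
      bboxLoop rest x y x y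

-- ===== PRECONDITION & SPEC =====
-- Pre_ excludes exactly the inputs where Python A raises: no legal vertex (empty-sequence min raises ValueError)
-- or a legal vertex with an empty coordinate list (x[0][0]/x[1][0] → IndexError).
def Pre_calc_projected_2d_bbox (vertices_pos2d : List (Option (List Int × List Int))) : Prop :=
  (vertices_pos2d.any Option.isSome) = true ∧
  (vertices_pos2d.all (fun o => (o.map (fun p => !p.1.isEmpty && !p.2.isEmpty)).getD true)) = true
instance (vertices_pos2d : List (Option (List Int × List Int))) : Decidable (Pre_calc_projected_2d_bbox vertices_pos2d) := by unfold Pre_calc_projected_2d_bbox; infer_instance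

def pvWitness_calc_projected_2d_bbox : (List (Option (List Int × List Int))) :=
  [some ([3], [5]), none, some ([1, 9], [7])]

def Spec_calc_projected_2d_bbox (vertices_pos2d : List (Option (List Int × List Int))) (out : List Int) : Prop := out = calc_projected_2d_bbox_alt vertices_pos2d
instance (vertices_pos2d : List (Option (List Int × List Int))) (out : List Int) : Decidable (Spec_calc_projected_2d_bbox vertices_pos2d out) := by unfold Spec_calc_projected_2d_bbox; infer_instance

-- ===== CLAIM (what is proved, stated in full; the proofs are below) =====
def Claim_equal_calc_projected_2d_bbox : Prop := ∀ (vertices_pos2d : List (Option (List Int × List Int))), Dom_calc_projected_2d_bbox vertices_pos2d → Pre_calc_projected_2d_bbox vertices_pos2d → Spec_calc_projected_2d_bbox vertices_pos2d (calc_projected_2d_bbox vertices_pos2d)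

-- ===== LEMMAS AND PROOFS =====
def xcs (l : List (Option (List Int × List Int))) : List Int :=
  (l.filterMap id).map (fun x => (PySem.List.pyGet? x.2 0).getD 0)
def ycs (l : List (Option (List Int × List Int))) : List Int :=
  (l.filterMap id).map (fun x => (PySem.List.pyGet? x.1 0).getD 0)

theorem bboxLoop_eq (l : List (Option (List Int × List Int))) :
    ∀ a b c d : Int, bboxLoop l a b c d =
      [(xcs l).foldl min a, (ycs l).foldl min b, (xcs l).foldl max c, (ycs l).foldl max d] := by
  induction l with
  | nil => intro a b c d; simp [bboxLoop, xcs, ycs]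
  | cons h t ih =>
      intro a b c d
      cases h with
      | none => simpa [bboxLoop, xcs, ycs] using ih a b c d
      | some v => simpa [bboxLoop, xcs, ycs] using ih _ _ _ _

theorem main_eq (l : List (Option (List Int × List Int)))
    (h : (l.any Option.isSome) = true) :
    calc_projected_2d_bbox l = calc_projected_2d_bbox_alt l := by
  induction l with
  | nil => simp at h
  | cons hd t ih =>
      cases hd with
      | none =>
          simp only [List.any_cons, Option.isSome_none, Bool.false_or] at h
          simpa [calc_projected_2d_bbox, calc_projected_2d_bbox_alt, List.filterMap_cons] using ih h
      | some v =>
          simp [calc_projected_2d_bbox, calc_projected_2d_bbox_alt,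
                bboxLoop_eq, xcs, ycs, PySem.List.min?_id_cons, PySem.List.max?_id_cons]

-- ===== VERDICT (by name: the statement is the Claim_ definition above) =====
theorem calc_projected_2d_bbox_spec : Claim_equal_calc_projected_2d_bbox := by
  intro v _ hpre
  unfold Spec_calc_projected_2d_bbox
  exact main_eq v hpre.1
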